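-- pv_equiv track=rewrite | github.com/pooja654/crossword_generator | generate.py | ranked_by_common_letters
-- ===== SOURCE A (Python) =====
-- def ranked_by_common_letters(grid, clues_dict):
--   ranked_words = []
--   letters_in_puzzle = []
--   for row in grid:
--     for char in row:
--       if char != ' ' and char != '-':
--         letters_in_puzzle.append(char)
--   for word in clues_dict.keys():
--     count = 0
--     for letter in letters_in_puzzle:
--       if letter in word:
--         count += 1
--
--     if count != 0:
--       ranked_words.append((count, word))
--
--   if ranked_words == []:
--     return None
--
--   return sorted(ranked_words, key=lambda x: x[0], reverse=True)
-- ===== SOURCE B (Python) =====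
-- def ranked_by_common_letters(grid, clues_dict):
--     # Inverted strategy: instead of rescanning all puzzle letters for every word,
--     # iterate once over the DISTINCT puzzle letters and, for each, add its
--     # multiplicity to the score of every word containing it.
--     chars = [c for row in grid for c in row if c != ' ' and c != '-']
--     scores = {w: 0 for w in clues_dict}
--     for letter in dict.fromkeys(chars):
--         n = chars.count(letter)
--         for w in scores:
--             if letter in w:
--                 scores[w] += n
--     result = sorted([(n, w) for w, n in scores.items() if n != 0],
--                     key=lambda x: x[0], reverse=True)
--     return result if result else None
-- ===== Notes on version B (the rewrite author's own statement) =====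
-- stated objective: faster
-- what changed: B inverts the iteration: it collects the filtered letter list once, then loops only over the DISTINCT puzzle letters, adding each letter's multiplicity to a score-dict entry of every word containing it, and finally filters and sorts the dict items; A instead rescans the full multiset of puzzle letters once per word.
import Mathlib
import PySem

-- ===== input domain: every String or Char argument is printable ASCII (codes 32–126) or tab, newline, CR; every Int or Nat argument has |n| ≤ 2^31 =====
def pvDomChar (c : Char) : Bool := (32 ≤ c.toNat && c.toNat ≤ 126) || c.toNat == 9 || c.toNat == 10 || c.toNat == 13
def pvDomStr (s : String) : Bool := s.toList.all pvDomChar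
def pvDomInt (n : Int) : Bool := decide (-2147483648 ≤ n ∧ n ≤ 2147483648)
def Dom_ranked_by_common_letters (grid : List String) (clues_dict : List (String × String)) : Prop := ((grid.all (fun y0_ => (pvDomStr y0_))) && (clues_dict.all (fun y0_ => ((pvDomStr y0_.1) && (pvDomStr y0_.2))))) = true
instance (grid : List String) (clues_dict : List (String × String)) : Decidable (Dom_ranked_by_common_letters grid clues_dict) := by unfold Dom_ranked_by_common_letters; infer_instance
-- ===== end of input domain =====

-- B inverts the iteration: it loops over the DISTINCT puzzle letters only, adding each
-- letter's multiplicity to a score-dict entry of every word containing it, instead of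
-- rescanning the full letter multiset for every word (alternative decomposition).

-- ===== PORT A =====
def ranked_by_common_letters (grid : List String) (clues_dict : List (String × String)) : Option (List (Int × String)) :=
  let letters_in_puzzle : List Char :=
    grid.foldl (fun acc row =>
      row.toList.foldl (fun acc c => if c ≠ ' ' ∧ c ≠ '-' then acc ++ [c] else acc) acc) []
  let ranked_words : List (Int × String) :=
    (PySem.List.dedup (clues_dict.map Prod.fst)).foldl (fun acc word =>
      let count : Int :=
        letters_in_puzzle.foldl (fun cnt l => if word.toList.contains l then cnt + 1 else cnt) 0
      if count != 0 then acc ++ [(count, word)] else acc) []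
  if ranked_words = [] then none
  else some (PySem.List.sorted ranked_words (fun x => x.1) true)

-- ===== PORT B =====
def ranked_by_common_letters_alt (grid : List String) (clues_dict : List (String × String)) : Option (List (Int × String)) :=
  let chars : List Char :=
    grid.flatMap (fun row => row.toList.filter (fun c => decide (c ≠ ' ' ∧ c ≠ '-')))
  let scores0 : PySem.Dict String Int :=
    clues_dict.foldl (fun d p => d.insert p.1 0) PySem.Dict.empty
  let scores : PySem.Dict String Int :=
    (PySem.List.dedup chars).foldl (fun d letter =>
      let n : Int := chars.count letter
      d.keys.foldl (fun d' w => if letter ∈ w.toList then d'.modify w 0 (· + n) else d') d)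
      scores0
  let result : List (Int × String) :=
    PySem.List.sorted ((scores.items.filter (fun p => p.2 != 0)).map (fun p => (p.2, p.1)))
      (fun x => x.1) true
  if result ≠ [] then some result else none

-- ===== PRECONDITION & SPEC =====
def Spec_ranked_by_common_letters (grid : List String) (clues_dict : List (String × String)) (out : Option (List (Int × String))) : Prop := out = ranked_by_common_letters_alt grid clues_dict
instance (grid : List String) (clues_dict : List (String × String)) (out : Option (List (Int × String))) : Decidable (Spec_ranked_by_common_letters grid clues_dict out) := by unfold Spec_ranked_by_common_letters; infer_instance

-- ===== CLAIM (what is proved, stated in full; the proofs are below) =====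
def Claim_equal_ranked_by_common_letters : Prop := ∀ (grid : List String) (clues_dict : List (String × String)), Dom_ranked_by_common_letters grid clues_dict → Spec_ranked_by_common_letters grid clues_dict (ranked_by_common_letters grid clues_dict)

-- ===== LEMMAS AND PROOFS =====

-- the puzzle letters, in order, as both programs collect them
def pvChars (grid : List String) : List Char :=
  grid.flatMap (fun row => row.toList.filter (fun c => decide (c ≠ ' ' ∧ c ≠ '-')))

-- A's score of a word: how many puzzle-letter occurrences the word contains
def pvCnt (grid : List String) (w : String) : Int :=
  ((pvChars grid).countP (fun l => w.toList.contains l) : Int)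

-- the common unsorted ranking both programs build
def pvRanked (grid : List String) (clues_dict : List (String × String)) : List (Int × String) :=
  ((PySem.List.dedup (clues_dict.map Prod.fst)).filter (fun w => pvCnt grid w != 0)).map
    (fun w => (pvCnt grid w, w))

-- A's letter-collecting double loop produces exactly pvChars
lemma lettersFold_eq (grid : List String) (acc : List Char) :
    grid.foldl (fun acc row =>
      row.toList.foldl (fun acc c => if c ≠ ' ' ∧ c ≠ '-' then acc ++ [c] else acc) acc) acc
    = acc ++ pvChars grid := by
  induction grid generalizing acc with
  | nil => simp [pvChars]
  | cons r rs ih =>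
    simp only [List.foldl_cons, ih, pvChars, List.flatMap_cons]
    rw [PySem.List.foldl_append_ite_eq_filter]
    simp [List.append_assoc]

-- B's initial dict: deduped clue keys, all values 0
lemma scores0_keys (clues_dict : List (String × String)) :
    (clues_dict.foldl (fun d p => d.insert p.1 (0:Int)) PySem.Dict.empty).keys
      = PySem.List.dedup (clues_dict.map Prod.fst) := by
  have h := PySem.Dict.keys_foldl_insert_key (l := clues_dict) (key := Prod.fst)
    (f := fun _ _ => (0:Int)) (d := PySem.Dict.empty)
  simpa [PySem.Set.update_nil_left] using h

lemma scores0_getD (clues_dict : List (String × String)) (w : String) :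
    (clues_dict.foldl (fun d p => d.insert p.1 (0:Int)) PySem.Dict.empty).getD w 0 = 0 := by
  have h : ∀ (l : List (String × String)) (d : PySem.Dict String Int),
      (∀ v : String, d.getD v 0 = 0) → ∀ v, (l.foldl (fun d p => d.insert p.1 (0:Int)) d).getD v 0 = 0 := by
    intro l
    induction l with
    | nil => intro d h v; exact h v
    | cons p ps ih =>
      intro d h v
      refine ih _ ?_ v
      intro u
      by_cases hu : u = p.1
      · subst hu; simp [PySem.Dict.getD_insert_self]
      · rw [PySem.Dict.getD_insert_of_ne]
        · exact h u
        · exact hu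
  exact h clues_dict PySem.Dict.empty (by simp [PySem.Dict.getD_empty]) w

-- B's inner loop (one letter): keys unchanged
lemma inner_keys (letter : Char) (n : Int) (ks : List String) (d : PySem.Dict String Int)
    (hks : ∀ k ∈ ks, k ∈ d.keys) :
    (ks.foldl (fun d' w => if letter ∈ w.toList then d'.modify w 0 (· + n) else d') d).keys
      = d.keys := by
  induction ks generalizing d with
  | nil => rfl
  | cons k ks ih =>
    simp only [List.foldl_cons]
    by_cases hk : letter ∈ k.toList
    · simp only [if_pos hk]
      have hkeys : (d.modify k 0 (· + n)).keys = d.keys := by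
        rw [PySem.Dict.keys_modify, PySem.Dict.keys_insert_of_contains]
        rw [PySem.Dict.contains_iff_mem_keys]
        exact hks k (by simp)
      rw [ih _ (by intro x hx; rw [hkeys]; exact hks x (by simp [hx])), hkeys]
    · simp only [if_neg hk]
      exact ih _ (fun x hx => hks x (by simp [hx]))

-- B's inner loop (one letter): a word's score grows by n iff the word is a key containing the letter
lemma inner_getD (letter : Char) (n : Int) (ks : List String) (d : PySem.Dict String Int)
    (hn : ks.Nodup) (hks : ∀ k ∈ ks, k ∈ d.keys) (w : String) :
    (ks.foldl (fun d' w => if letter ∈ w.toList then d'.modify w 0 (· + n) else d') d).getD w 0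
      = d.getD w 0 + (if w ∈ ks ∧ letter ∈ w.toList then n else 0) := by
  induction ks generalizing d with
  | nil => simp
  | cons k ks ih =>
    simp only [List.nodup_cons] at hn
    simp only [List.foldl_cons]
    by_cases hk : letter ∈ k.toList
    · simp only [if_pos hk]
      have hkeys : (d.modify k 0 (· + n)).keys = d.keys := by
        rw [PySem.Dict.keys_modify, PySem.Dict.keys_insert_of_contains]
        rw [PySem.Dict.contains_iff_mem_keys]
        exact hks k (by simp)
      rw [ih _ hn.2 (by intro x hx; rw [hkeys]; exact hks x (by simp [hx]))]
      rw [PySem.Dict.getD_modify]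
      by_cases hw : w = k
      · subst hw
        simp [hn.1, hk]
      · simp only [if_neg hw]
        by_cases hmem : w ∈ ks <;> simp [hmem, hw, List.mem_cons]
    · simp only [if_neg hk]
      rw [ih _ hn.2 (fun x hx => hks x (by simp [hx]))]
      by_cases hw : w = k
      · subst hw; simp [hk, hn.1]
      · simp [List.mem_cons, hw]

-- B's outer loop over the distinct letters: keys unchanged, scores accumulate
lemma outer_state (chars : List Char) (S : List Char) (d : PySem.Dict String Int)
    (hnd : d.keys.Nodup) :
    (S.foldl (fun d letter =>
      d.keys.foldl (fun d' w => if letter ∈ w.toList then d'.modify w 0 (· + (chars.count letter : Int)) else d') d) d).keys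
      = d.keys
    ∧ ∀ w ∈ d.keys,
    (S.foldl (fun d letter =>
      d.keys.foldl (fun d' w => if letter ∈ w.toList then d'.modify w 0 (· + (chars.count letter : Int)) else d') d) d).getD w 0
      = d.getD w 0 + (S.map (fun s => if s ∈ w.toList then (chars.count s : Int) else 0)).sum := by
  induction S generalizing d with
  | nil => exact ⟨rfl, by simp⟩
  | cons s S ih =>
    simp only [List.foldl_cons]
    have hk1 : (d.keys.foldl (fun d' w => if s ∈ w.toList then d'.modify w 0 (· + (chars.count s : Int)) else d') d).keys = d.keys :=
      inner_keys s _ d.keys d (fun k hk => hk)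
    have hnd1 : (d.keys.foldl (fun d' w => if s ∈ w.toList then d'.modify w 0 (· + (chars.count s : Int)) else d') d).keys.Nodup := by
      rw [hk1]; exact hnd
    obtain ⟨ihk, ihg⟩ := ih _ hnd1
    constructor
    · rw [ihk, hk1]
    · intro w hw
      rw [ihg w (by rw [hk1]; exact hw)]
      rw [inner_getD s _ d.keys d hnd (fun k hk => hk) w]
      simp only [List.map_cons, List.sum_cons]
      by_cases hsw : s ∈ w.toList
      · simp [hw, hsw]; ring
      · simp [hsw]

-- an indicator sum over any list is its count of the indicated element
lemma sum_ind_count (S : List Char) (x : Char) :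
    (S.map (fun s => if s = x then (1:Nat) else 0)).sum = S.count x := by
  induction S with
  | nil => simp
  | cons s S ih => by_cases h : s = x <;> simp [h, ih, Nat.add_comm]

-- summing a word's distinct-letter multiplicities is A's occurrence count
lemma sum_count_gen (S : List Char) (hn : S.Nodup) (q : Char → Bool) :
    ∀ (L : List Char), (∀ x ∈ L, x ∈ S) →
      (S.map (fun s => if q s then L.count s else 0)).sum = L.countP q := by
  intro L
  induction L with
  | nil =>
    intro _
    simp [List.sum_eq_zero]
  | cons x L ihL =>
    intro hcov
    have hx : x ∈ S := hcov x (by simp)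
    have hstep : ∀ s : Char, (if q s then (x :: L).count s else 0)
        = (if q s then L.count s else 0) + (if q x then (if s = x then 1 else 0) else 0) := by
      intro s
      by_cases hsx : s = x
      · subst hsx; by_cases hq : q s <;> simp [hq, List.count_cons_self]
      · have : (x :: L).count s = L.count s :=
          List.count_cons_of_ne (fun h => hsx h.symm) (l := L)
        by_cases hq : q s <;> simp [hq, this, hsx]
    calc (S.map (fun s => if q s then (x :: L).count s else 0)).sum
        = (S.map (fun s => (if q s then L.count s else 0) + (if q x then (if s = x then 1 else 0) else 0))).sum :=
          congrArg List.sum (List.map_congr_left (fun s _ => hstep s))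
      _ = (S.map (fun s => if q s then L.count s else 0)).sum
            + (S.map (fun s => if q x then (if s = x then 1 else 0) else 0)).sum := by
          rw [← List.sum_map_add]
      _ = L.countP q + (if q x then 1 else 0) := by
          rw [ihL (fun y hy => hcov y (by simp [hy]))]
          congr 1
          by_cases hq : q x
          · simp only [if_pos hq]
            rw [sum_ind_count, List.count_eq_one_of_mem hn hx]
          · simp [hq, List.sum_eq_zero]
      _ = (x :: L).countP q := by
          rw [List.countP_cons]

lemma sum_dedup_count (L : List Char) (q : Char → Bool) :
    ((PySem.List.dedup L).map (fun s => if q s then L.count s else 0)).sum = L.countP q := by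
  exact sum_count_gen _ (PySem.List.nodup_dedup L) q L (fun x hx => (PySem.List.mem_dedup L x).2 hx)

-- A computes: sort pvRanked unless it is empty
lemma A_eq (grid : List String) (clues_dict : List (String × String)) :
    ranked_by_common_letters grid clues_dict
      = if pvRanked grid clues_dict = [] then none
        else some (PySem.List.sorted (pvRanked grid clues_dict) (fun x => x.1) true) := by
  unfold ranked_by_common_letters
  simp only [lettersFold_eq, List.nil_append]
  have hbody : ∀ (acc : List (Int × String)) (word : String),
      (let count : Int := (pvChars grid).foldl (fun cnt l => if word.toList.contains l then cnt + 1 else cnt) 0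
       if count != 0 then acc ++ [(count, word)] else acc)
      = (if pvCnt grid word != 0 then acc ++ [(pvCnt grid word, word)] else acc) := by
    intro acc word
    have h := PySem.List.foldl_if_add_one (fun l => word.toList.contains l) (l := pvChars grid) (a := 0)
    simp only [h, zero_add]
    rfl
  have hfold : (PySem.List.dedup (clues_dict.map Prod.fst)).foldl (fun acc word =>
      let count : Int :=
        (pvChars grid).foldl (fun cnt l => if word.toList.contains l then cnt + 1 else cnt) 0
      if count != 0 then acc ++ [(count, word)] else acc) []
      = pvRanked grid clues_dict := by
    have hfun : (fun (acc : List (Int × String)) (word : String) =>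
        let count : Int :=
          (pvChars grid).foldl (fun cnt l => if word.toList.contains l then cnt + 1 else cnt) 0
        if count != 0 then acc ++ [(count, word)] else acc)
        = (fun acc word => if pvCnt grid word != 0 then acc ++ [(pvCnt grid word, word)] else acc) :=
      funext fun acc => funext fun word => hbody acc word
    rw [hfun, PySem.List.foldl_append_if]
    simp [pvRanked]
  rw [hfold]

-- B computes: sort pvRanked, answer none iff the sorted list is empty
lemma B_eq (grid : List String) (clues_dict : List (String × String)) :
    ranked_by_common_letters_alt grid clues_dict
      = if PySem.List.sorted (pvRanked grid clues_dict) (fun x => x.1) true ≠ [] then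
          some (PySem.List.sorted (pvRanked grid clues_dict) (fun x => x.1) true)
        else none := by
  unfold ranked_by_common_letters_alt
  have hC : grid.flatMap (fun row => row.toList.filter (fun c => decide (c ≠ ' ' ∧ c ≠ '-'))) = pvChars grid := rfl
  simp only [hC]
  set C := pvChars grid with hCdef
  set K := PySem.List.dedup (clues_dict.map Prod.fst) with hK
  set scores0 : PySem.Dict String Int := clues_dict.foldl (fun d p => d.insert p.1 0) PySem.Dict.empty with hs0
  set scores : PySem.Dict String Int :=
    (PySem.List.dedup C).foldl (fun d letter =>
      d.keys.foldl (fun d' w => if letter ∈ w.toList then d'.modify w 0 (· + (C.count letter : Int)) else d') d)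
      scores0 with hs
  have hky0 : scores0.keys = K := scores0_keys clues_dict
  have hnd0 : scores0.keys.Nodup := by rw [hky0]; exact PySem.List.nodup_dedup _
  obtain ⟨hky, hgd⟩ := outer_state C (PySem.List.dedup C) scores0 hnd0
  have hkyK : scores.keys = K := by rw [hs, hky, hky0]
  have hitems : scores.items = K.map (fun w => (w, pvCnt grid w)) := by
    rw [PySem.Dict.items_eq_map_keys scores (by rw [hkyK]; exact PySem.List.nodup_dedup _) 0, hkyK]
    refine List.map_congr_left ?_
    intro w hw
    have hw0 : w ∈ scores0.keys := by rw [hky0]; exact hw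
    rw [hs, hgd w hw0, scores0_getD, zero_add]
    have hterm : ∀ s : Char, (if s ∈ w.toList then (C.count s : Int) else 0)
        = ((if w.toList.contains s then C.count s else 0 : ℕ) : ℤ) := by
      intro s
      by_cases hm : s ∈ w.toList
      · simp [hm]
      · simp [hm]
    rw [List.map_congr_left (fun s _ => hterm s)]
    have hcast : ((PySem.List.dedup C).map (fun s => ((if w.toList.contains s then C.count s else 0 : ℕ) : ℤ))).sum
        = (((PySem.List.dedup C).map (fun s => if w.toList.contains s then C.count s else 0)).sum : ℤ) := by
      rw [Nat.cast_list_sum, List.map_map]; rfl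
    rw [hcast, sum_dedup_count C (fun s => w.toList.contains s)]
    rfl
  rw [hitems]
  have hlist : ((K.map (fun w => (w, pvCnt grid w))).filter (fun p => p.2 != 0)).map (fun p => (p.2, p.1))
      = pvRanked grid clues_dict := by
    rw [List.filter_map, List.map_map]
    rfl
  rw [hlist]

-- ===== VERDICT (by name: the statement is the Claim_ definition above) =====
theorem ranked_by_common_letters_spec : Claim_equal_ranked_by_common_letters := by
  intro grid clues_dict _
  unfold Spec_ranked_by_common_letters
  rw [A_eq, B_eq]
  by_cases h : pvRanked grid clues_dict = []
  · simp [h, PySem.List.sorted_eq_nil_iff]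
  · have hs : PySem.List.sorted (pvRanked grid clues_dict) (fun x => x.1) true ≠ [] := by
      rw [Ne, PySem.List.sorted_eq_nil_iff]; exact h
    simp [h, hs]
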